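-- pv_equiv track=rewrite | github.com/obn11/COSC | COSC261 Compilers/Assignment1 Alg.py | things
-- ===== SOURCE A (Python) =====
-- def things(list1, list2, stuff=0, i=0):
--     if stuff == 0:
--         stuff = []
--     if i != len(list1):
--         stuff = thingshelp(list1, list2, stuff, i)
--
--         i += 1
--         return things(list1, list2, stuff, i)
--     else:
--         return stuff
--
-- def thingshelp(list1, list2, stuff, i, j=0):
--     if j != len(list2):
--         if list2[j] > list1[i]:
--             stuff.append((list1[i], list2[j]))
--         j += 1
--         return thingshelp(list1, list2, stuff, i, j)
--     else:
--         return stuff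
-- ===== SOURCE B (Python) =====
-- def things(list1, list2, stuff=0, i=0):
--     if stuff == 0:
--         stuff = []
--     for a in range(i, len(list1)):
--         for j in range(len(list2)):
--             if list2[j] > list1[a]:
--                 stuff.append((list1[a], list2[j]))
--     return stuff
-- ===== Notes on version B (the rewrite author's own statement) =====
-- stated objective: simpler
-- what changed: Replaced the two mutually recursive helper functions with a single pair of explicit nested for-loops over range(i, len(list1)) and range(len(list2)); the thingshelp helper disappears.
-- outside the precondition, e.g. on things([], [], 5, 0): A returns 5, B returns 5
import Mathlib
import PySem

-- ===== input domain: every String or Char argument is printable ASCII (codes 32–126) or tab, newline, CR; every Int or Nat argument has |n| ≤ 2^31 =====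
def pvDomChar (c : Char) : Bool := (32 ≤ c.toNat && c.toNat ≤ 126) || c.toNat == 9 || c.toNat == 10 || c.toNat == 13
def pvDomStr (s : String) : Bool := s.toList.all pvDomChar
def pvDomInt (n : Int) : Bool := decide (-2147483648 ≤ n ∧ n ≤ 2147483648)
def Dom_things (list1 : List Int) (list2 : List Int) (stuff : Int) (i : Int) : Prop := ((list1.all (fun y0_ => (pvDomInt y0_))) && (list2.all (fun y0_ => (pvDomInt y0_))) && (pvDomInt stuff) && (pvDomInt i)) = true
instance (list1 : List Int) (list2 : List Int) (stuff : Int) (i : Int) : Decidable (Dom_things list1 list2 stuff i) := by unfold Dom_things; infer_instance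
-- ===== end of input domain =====

-- B replaces A's two mutually recursive helpers by plain nested loops (simpler decomposition, same O(n*m) cost).
-- A mutates a caller-supplied list when stuff ≠ 0 is a list; under the Int typing Pre_ restricts to the sentinel stuff = 0,
-- so the equivalence is about the returned value.

-- ===== PORT A =====
-- inner recursion thingshelp: j counts up to len(list2); fuel only makes the recursion total (j starts at 0, fuel = len(list2) suffices)
def thingshelpGo (list1 : List Int) (list2 : List Int) (stuff : List (Int × Int)) (i : Int) (j : Int) (fuel : Nat) : List (Int × Int) :=
  match fuel with
  | 0 => stuff
  | fuel + 1 =>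
    if j ≠ (list2.length : Int) then
      let stuff' := if PySem.List.pyGetD list2 j 0 > PySem.List.pyGetD list1 i 0 then
          stuff ++ [(PySem.List.pyGetD list1 i 0, PySem.List.pyGetD list2 j 0)] else stuff
      thingshelpGo list1 list2 stuff' i (j + 1) fuel
    else stuff

-- outer recursion of things: i counts up to len(list1); fuel (len(list1) - i) only makes the recursion total
def thingsGo (list1 : List Int) (list2 : List Int) (stuff : List (Int × Int)) (i : Int) (fuel : Nat) : List (Int × Int) :=
  match fuel with
  | 0 => stuff
  | fuel + 1 =>
    if i ≠ (list1.length : Int) then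
      thingsGo list1 list2 (thingshelpGo list1 list2 stuff i 0 list2.length) (i + 1) fuel
    else stuff

def things (list1 : List Int) (list2 : List Int) (stuff : Int) (i : Int) : List (Int × Int) :=
  -- Pre_things forces the sentinel stuff = 0, where Python replaces it by []
  thingsGo list1 list2 [] i ((list1.length - i).toNat)

-- ===== PORT B =====
def things_alt (list1 : List Int) (list2 : List Int) (stuff : Int) (i : Int) : List (Int × Int) :=
  (PySem.List.pyRange i list1.length 1).foldl (fun acc a =>
    (PySem.List.pyRange 0 list2.length 1).foldl (fun acc2 j =>
      if PySem.List.pyGetD list2 j 0 > PySem.List.pyGetD list1 a 0 then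
        acc2 ++ [(PySem.List.pyGetD list1 a 0, PySem.List.pyGetD list2 j 0)]
      else acc2) acc) []

-- ===== PRECONDITION & SPEC =====
-- Pre_ excludes: stuff ≠ 0 (Python then threads an int accumulator, returning an int — not a value of the declared
-- list type — or raising AttributeError on the first append); i > len(list1) (A recurses forever, RecursionError);
-- i < -len(list1) (IndexError from negative indexing).  Negative i with -len ≤ i is kept: both wrap identically.
def Pre_things (list1 : List Int) (list2 : List Int) (stuff : Int) (i : Int) : Prop :=
  stuff = 0 ∧ -(list1.length : Int) ≤ i ∧ i ≤ (list1.length : Int)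
instance (list1 : List Int) (list2 : List Int) (stuff : Int) (i : Int) : Decidable (Pre_things list1 list2 stuff i) := by unfold Pre_things; infer_instance
def pvWitness_things : List Int × List Int × Int × Int := ([1, 3, 2], [2, 4], 0, 0)

def Spec_things (list1 : List Int) (list2 : List Int) (stuff : Int) (i : Int) (out : List (Int × Int)) : Prop := out = things_alt list1 list2 stuff i
instance (list1 : List Int) (list2 : List Int) (stuff : Int) (i : Int) (out : List (Int × Int)) : Decidable (Spec_things list1 list2 stuff i out) := by unfold Spec_things; infer_instance

-- ===== CLAIM (what is proved, stated in full; the proofs are below) =====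
def Claim_equal_things : Prop := ∀ (list1 : List Int) (list2 : List Int) (stuff : Int) (i : Int), Dom_things list1 list2 stuff i → Pre_things list1 list2 stuff i → Spec_things list1 list2 stuff i (things list1 list2 stuff i)

-- ===== LEMMAS AND PROOFS =====

-- the inner loop body shared (after the proof) by both ports
def innerStep (list1 list2 : List Int) (a : Int) : List (Int × Int) → Int → List (Int × Int) :=
  fun acc2 j =>
    if PySem.List.pyGetD list2 j 0 > PySem.List.pyGetD list1 a 0 then
      acc2 ++ [(PySem.List.pyGetD list1 a 0, PySem.List.pyGetD list2 j 0)]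
    else acc2

-- A's inner recursion computes B's inner fold over the remaining range
theorem thingshelpGo_eq_foldl (list1 list2 : List Int) (i : Int) :
    ∀ (fuel : Nat) (j : Int) (acc : List (Int × Int)),
      j + fuel = (list2.length : Int) →
      thingshelpGo list1 list2 acc i j fuel
        = (PySem.List.pyRange j list2.length 1).foldl (innerStep list1 list2 i) acc := by
  intro fuel
  induction fuel with
  | zero =>
    intro j acc h
    rw [PySem.List.pyRange_one_eq_nil (by omega)]
    rfl
  | succ n ih =>
    intro j acc h
    have hj : j < (list2.length : Int) := by omega
    rw [thingshelpGo, if_pos (by omega), PySem.List.pyRange_one_cons hj, List.foldl_cons]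
    exact ih (j + 1) _ (by omega)

-- A's outer recursion computes B's outer fold over the remaining range
theorem thingsGo_eq_foldl (list1 list2 : List Int) :
    ∀ (fuel : Nat) (i : Int) (acc : List (Int × Int)),
      i + fuel = (list1.length : Int) →
      thingsGo list1 list2 acc i fuel
        = (PySem.List.pyRange i list1.length 1).foldl
            (fun acc a => (PySem.List.pyRange 0 list2.length 1).foldl (innerStep list1 list2 a) acc) acc := by
  intro fuel
  induction fuel with
  | zero =>
    intro i acc h
    rw [PySem.List.pyRange_one_eq_nil (a := i) (b := (list1.length : Int)) (by omega)]
    rfl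
  | succ n ih =>
    intro i acc h
    have hi : i < (list1.length : Int) := by omega
    rw [thingsGo, if_pos (by omega), PySem.List.pyRange_one_cons hi, List.foldl_cons,
        thingshelpGo_eq_foldl list1 list2 i list2.length 0 acc (by omega)]
    exact ih (i + 1) _ (by omega)

-- ===== VERDICT (by name: the statement is the Claim_ definition above) =====
theorem things_spec : Claim_equal_things := by
  intro list1 list2 stuff i _ hpre
  obtain ⟨-, hlo, hhi⟩ := hpre
  show things list1 list2 stuff i = things_alt list1 list2 stuff i
  unfold things things_alt
  rw [thingsGo_eq_foldl list1 list2 ((list1.length - i).toNat) i [] (by omega)]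
  rfl
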